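-- pv_equiv track=rewrite | github.com/shakfu/shedskin | shedskin/cpp.py | group_declarations
-- ===== SOURCE A (Python) =====
-- from typing import (IO, TYPE_CHECKING, Any, Dict, Iterator, List, Optional,
--                     Tuple, TypeAlias, Union)
--
-- def group_declarations(pairs: List[Tuple[str, str]]) -> List[str]:
--     """Group pairs of (type, name) declarations"""
--     group: Dict[str, List[str]] = {}
--     for type, name in pairs:
--         group.setdefault(type, []).append(name)
--     result = []
--     for type, names in group.items():
--         names.sort()
--         if type.endswith("*"):
--             result.append(type + (", *".join(names)) + ";\n")
--         else:
--             result.append(type + (", ".join(names)) + ";\n")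
--     return result
-- ===== SOURCE B (Python) =====
-- def group_declarations(pairs):
--     """Group pairs of (type, name) declarations"""
--     types = list(dict.fromkeys(t for t, _ in pairs))
--     out = []
--     for t in types:
--         names = sorted(n for ty, n in pairs if ty == t)
--         out.append(t + (", *" if t.endswith("*") else ", ").join(names) + ";\n")
--     return out
-- ===== Notes on version B (the rewrite author's own statement) =====
-- stated objective: alternative
-- what changed: Replaces A's dict-grouping pass (setdefault/append then iterate items) with an ordered dedup of the types followed by a filter-and-sort scan of the pairs for each distinct type.
import Mathlib
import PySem

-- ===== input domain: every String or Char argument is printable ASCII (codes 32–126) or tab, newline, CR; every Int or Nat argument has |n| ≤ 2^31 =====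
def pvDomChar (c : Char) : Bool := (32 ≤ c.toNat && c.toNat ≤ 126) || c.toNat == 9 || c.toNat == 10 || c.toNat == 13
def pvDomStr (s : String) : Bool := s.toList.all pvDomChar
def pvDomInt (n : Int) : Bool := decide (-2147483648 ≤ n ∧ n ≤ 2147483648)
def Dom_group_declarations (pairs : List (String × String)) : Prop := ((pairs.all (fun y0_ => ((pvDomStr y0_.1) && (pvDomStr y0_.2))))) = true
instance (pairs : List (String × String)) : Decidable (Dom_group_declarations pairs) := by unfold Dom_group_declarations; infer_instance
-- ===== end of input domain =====

-- B replaces A's dict-grouping pass by an ordered dedup of the types followed by a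
-- filter-and-sort per type (same cost class; objective: alternative decomposition).

-- ===== PORT A =====
-- group.setdefault(type, []).append(name)  ≡  group[type] = group.get(type, []) + [name]
def group_declarations (pairs : List (String × String)) : List String :=
  let group : PySem.Dict String (List String) :=
    pairs.foldl (fun d p => d.modify p.1 [] (· ++ [p.2])) PySem.Dict.empty
  group.items.foldl (fun result p =>
    let names := PySem.List.sorted p.2 (fun x => x) false
    if PySem.Str.endswith p.1 "*" then
      result ++ [p.1 ++ PySem.Str.join ", *" names ++ ";\n"]
    else
      result ++ [p.1 ++ PySem.Str.join ", " names ++ ";\n"]) []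

-- ===== PORT B =====
def group_declarations_alt (pairs : List (String × String)) : List String :=
  let types := PySem.List.dedup (pairs.map (·.1))
  types.map (fun t =>
    let names := PySem.List.sorted ((pairs.filter (fun p => p.1 == t)).map (·.2)) (fun x => x) false
    t ++ PySem.Str.join (if PySem.Str.endswith t "*" then ", *" else ", ") names ++ ";\n")

-- ===== PRECONDITION & SPEC =====
def Spec_group_declarations (pairs : List (String × String)) (out : List String) : Prop := out = group_declarations_alt pairs
instance (pairs : List (String × String)) (out : List String) : Decidable (Spec_group_declarations pairs out) := by unfold Spec_group_declarations; infer_instance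

-- ===== CLAIM (what is proved, stated in full; the proofs are below) =====
def Claim_equal_group_declarations : Prop := ∀ (pairs : List (String × String)), Dom_group_declarations pairs → Spec_group_declarations pairs (group_declarations pairs)

-- ===== LEMMAS AND PROOFS =====

-- A's grouping dict, characterised: its keys are the distinct types in first-seen
-- order and the entry at t is the list of names paired with t, in input order.
theorem groupDict_keys (pairs : List (String × String)) :
    (pairs.foldl (fun d p => d.modify p.1 [] (· ++ [p.2]))
      (PySem.Dict.empty : PySem.Dict String (List String))).keys
      = PySem.Set.ofList (pairs.map (·.1)) := by
  rw [PySem.Dict.keys_foldl_modify_key]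
  rfl

theorem groupDict_nodup (pairs : List (String × String)) :
    (pairs.foldl (fun d p => d.modify p.1 [] (· ++ [p.2]))
      (PySem.Dict.empty : PySem.Dict String (List String))).keys.Nodup := by
  exact PySem.Dict.nodup_keys_foldl_modify_key pairs (·.1) [] (fun d p => (· ++ [p.2]))
    PySem.Dict.empty (by simp [PySem.Dict.keys_empty])

theorem groupDict_getD (pairs : List (String × String)) (t : String) :
    (pairs.foldl (fun d p => d.modify p.1 [] (· ++ [p.2]))
      (PySem.Dict.empty : PySem.Dict String (List String))).getD t []
      = (pairs.filter (fun p => p.1 == t)).map (·.2) := by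
  rw [PySem.Dict.getD_foldl_modify_append]
  simp [PySem.Dict.getD_empty]

-- A's output loop appends one string per item, so it is a map over the items.
theorem foldA_eq_map (l : List (String × List String)) (acc : List String) :
    l.foldl (fun result p =>
      let names := PySem.List.sorted p.2 (fun x => x) false
      if PySem.Str.endswith p.1 "*" then
        result ++ [p.1 ++ PySem.Str.join ", *" names ++ ";\n"]
      else
        result ++ [p.1 ++ PySem.Str.join ", " names ++ ";\n"]) acc
    = acc ++ l.map (fun p =>
        let names := PySem.List.sorted p.2 (fun x => x) false
        if PySem.Str.endswith p.1 "*" then p.1 ++ PySem.Str.join ", *" names ++ ";\n"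
        else p.1 ++ PySem.Str.join ", " names ++ ";\n") := by
  induction l generalizing acc with
  | nil => simp
  | cons p l ih =>
    simp only [List.foldl_cons, List.map_cons, ih]
    split_ifs <;> simp

-- ===== VERDICT (by name: the statement is the Claim_ definition above) =====
theorem group_declarations_spec : Claim_equal_group_declarations := by
  intro pairs _
  unfold Spec_group_declarations group_declarations group_declarations_alt
  rw [foldA_eq_map,
    PySem.Dict.items_eq_map_keys _ (groupDict_nodup pairs) ([] : List String),
    groupDict_keys pairs, List.map_map, PySem.List.dedup_eq_ofList, List.nil_append]
  refine List.map_congr_left (fun t _ => ?_)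
  simp only [Function.comp, groupDict_getD pairs t]
  split_ifs <;> simp
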